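-- pv_equiv track=rewrite | github.com/criteo/biggraphite | biggraphite/glob_utils.py | _group_char_selector
-- ===== SOURCE A (Python) =====
-- def _group_char_selector(chars):
--     """Separate chars from char ranges."""
--     i = 0
--     result = set()
--     size = len(chars)
--     while i < size:
--         if i < size - 2 and chars[i + 1] == "-":
--             # char range.
--             result.add(chars[i:i + 3])
--             i += 3
--         elif chars[i] != "-":
--             result.add(chars[i])
--             i += 1
--         else:
--             # Ignore wrongly positioned -
--             i += 1
--     return result
-- ===== SOURCE B (Python) =====
-- import re
--
-- def _group_char_selector(chars):
--     """Separate chars from char ranges."""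
--     # One regex scan: a 3-char range (any char, '-', any char) wins over a lone
--     # non-dash char; a stray '-' matches neither branch and is skipped.
--     return set(re.findall(r'.-.|[^-]', chars, re.DOTALL))
-- ===== Notes on version B (the rewrite author's own statement) =====
-- stated objective: idiomatic
-- what changed: Replaces the manual index-stepping while loop with a single regex scan re.findall(r'.-.|[^-]', chars, re.DOTALL) collected into a set; the alternation order encodes A's range-priority and stray-dash skipping.
import Mathlib
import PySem

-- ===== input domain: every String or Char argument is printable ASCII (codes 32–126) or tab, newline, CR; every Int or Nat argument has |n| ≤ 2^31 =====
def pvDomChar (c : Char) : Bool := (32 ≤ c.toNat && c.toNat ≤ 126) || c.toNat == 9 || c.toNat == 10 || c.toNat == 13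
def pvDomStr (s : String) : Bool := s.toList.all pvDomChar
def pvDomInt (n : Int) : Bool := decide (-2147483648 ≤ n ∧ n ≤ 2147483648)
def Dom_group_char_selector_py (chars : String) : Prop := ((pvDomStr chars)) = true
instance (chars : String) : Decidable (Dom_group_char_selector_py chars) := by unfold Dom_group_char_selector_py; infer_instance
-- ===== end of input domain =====

-- B replaces A's index-stepping while loop by a single regex scan (idiomatic); same result.

-- ===== PORT A =====
-- the while loop: i steps by 3 (char range), by 1 (plain char) or by 1 (stray '-')
def groupLoopA (s : List Char) (size : Nat) (i : Nat) (result : PySem.Set String) :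
    PySem.Set String :=
  if i < size then
    if i < size - 2 ∧ PySem.List.pyGetD s ((i : Int) + 1) ' ' = '-' then
      groupLoopA s size (i + 3)
        (PySem.Set.add result
          (String.mk (PySem.List.slice s (some (i : Int)) (some ((i : Int) + 3)))))
    else if PySem.List.pyGetD s (i : Int) ' ' ≠ '-' then
      groupLoopA s size (i + 1)
        (PySem.Set.add result (String.mk [PySem.List.pyGetD s (i : Int) ' ']))
    else
      groupLoopA s size (i + 1) result
  else result
termination_by size - i
decreasing_by all_goals omega

def group_char_selector_py (chars : String) : List String :=
  groupLoopA chars.toList chars.toList.length 0 PySem.Set.empty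

-- ===== PORT B =====
-- hand-written matcher for re.findall(r'.-.|[^-]', chars, re.DOTALL): exact for this
-- pattern — at each position try the 3-char branch '.-.' first, then '[^-]', else
-- advance one char without a match (the stray '-').
def pyFindallGroups : List Char → List String
  | a :: '-' :: b :: rest => String.mk [a, '-', b] :: pyFindallGroups rest
  | '-' :: rest => pyFindallGroups rest
  | c :: rest => String.mk [c] :: pyFindallGroups rest
  | [] => []

def group_char_selector_py_alt (chars : String) : List String :=
  PySem.Set.ofList (pyFindallGroups chars.toList)

-- ===== PRECONDITION & SPEC =====
def Spec_group_char_selector_py (chars : String) (out : List String) : Prop := out = group_char_selector_py_alt chars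
instance (chars : String) (out : List String) : Decidable (Spec_group_char_selector_py chars out) := by unfold Spec_group_char_selector_py; infer_instance

-- ===== CLAIM (what is proved, stated in full; the proofs are below) =====
def Claim_equal_group_char_selector_py : Prop := ∀ (chars : String), Dom_group_char_selector_py chars → Spec_group_char_selector_py chars (group_char_selector_py chars)

-- ===== LEMMAS AND PROOFS =====

-- the regex branch '.-.' fires
theorem pf_range (a b : Char) (rest : List Char) :
    pyFindallGroups (a :: '-' :: b :: rest) = String.mk [a, '-', b] :: pyFindallGroups rest := by
  rw [pyFindallGroups]

-- the regex branch '[^-]' fires: head is not '-' and no 3-char range starts here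
theorem pf_one (c : Char) (rest : List Char) (hc : c ≠ '-')
    (hrest : ∀ b t, rest ≠ '-' :: b :: t) :
    pyFindallGroups (c :: rest) = String.mk [c] :: pyFindallGroups rest := by
  rw [pyFindallGroups.eq_def]; split <;> simp_all

-- neither branch matches at a stray '-': the scan skips it
theorem pf_skip (rest : List Char) (hrest : ∀ b t, rest ≠ '-' :: b :: t) :
    pyFindallGroups ('-' :: rest) = pyFindallGroups rest := by
  rw [pyFindallGroups.eq_def]; split <;> simp_all
  rename_i hne heq
  exact hne heq.1.symm

-- A's loop from position i collects exactly the regex matches of the remaining suffix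
theorem groupLoopA_eq_foldl (s : List Char) : ∀ (n i : Nat) (result : PySem.Set String),
    s.length - i ≤ n →
    groupLoopA s s.length i result
      = (pyFindallGroups (s.drop i)).foldl PySem.Set.add result := by
  intro n
  induction n with
  | zero =>
    intro i result h
    rw [groupLoopA]
    rw [if_neg (by omega : ¬ i < s.length), List.drop_eq_nil_of_le (by omega)]
    rfl
  | succ n ih =>
    intro i result h
    rw [groupLoopA]
    by_cases hi : i < s.length
    · rw [if_pos hi]
      have hcast : ((i : Int) + 1) = ((i + 1 : Nat) : Int) := by push_cast; ring
      have hgi : PySem.List.pyGetD s (i : Int) ' ' = s[i] := by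
        simp [PySem.List.pyGetD_natCast, List.getElem?_eq_getElem hi]
      by_cases hcond : i < s.length - 2 ∧ PySem.List.pyGetD s ((i : Int) + 1) ' ' = '-'
      · rw [if_pos hcond]
        obtain ⟨h1, h2⟩ := hcond
        have hi1 : i + 1 < s.length := by omega
        have hi2 : i + 2 < s.length := by omega
        have hd2 : s[i + 1] = '-' := by
          rw [hcast, PySem.List.pyGetD_natCast, List.getD_eq_getElem s ' ' hi1] at h2
          exact h2
        have hdrop3 : s.drop i = s[i] :: '-' :: s[i + 2] :: s.drop (i + 3) := by
          rw [List.drop_eq_getElem_cons hi, List.drop_eq_getElem_cons hi1,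
            List.drop_eq_getElem_cons hi2, hd2]
        have hslice : PySem.List.slice s (some (i : Int)) (some ((i : Int) + 3))
            = [s[i], '-', s[i + 2]] := by
          rw [show ((i : Int) + 3) = ((i + 3 : Nat) : Int) by push_cast; ring,
            PySem.List.slice_natCast, show i + 3 - i = 3 by omega, hdrop3]
          rfl
        rw [hdrop3, pf_range, hslice, List.foldl_cons]
        exact ih (i + 3) _ (by omega)
      · rw [if_neg hcond]
        have hrest : ∀ b t, s.drop (i + 1) ≠ '-' :: b :: t := by
          intro b t hEq
          have hlen := congrArg List.length hEq
          simp [List.length_drop] at hlen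
          have hi1 : i + 1 < s.length := by omega
          have hEq' := (List.drop_eq_getElem_cons hi1).symm.trans hEq
          injection hEq' with hd2 _
          exact hcond ⟨by omega,
            by rw [hcast, PySem.List.pyGetD_natCast, List.getD_eq_getElem s ' ' hi1]; exact hd2⟩
        rw [List.drop_eq_getElem_cons hi]
        by_cases hc : s[i] = '-'
        · rw [if_neg (by simp [hgi, hc])]
          rw [hc, pf_skip _ hrest]
          exact ih (i + 1) result (by omega)
        · rw [if_pos (by simp [hgi, hc])]
          rw [pf_one _ _ hc hrest, List.foldl_cons, hgi]
          exact ih (i + 1) _ (by omega)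
    · rw [if_neg hi, List.drop_eq_nil_of_le (by omega)]
      rfl

-- ===== VERDICT (by name: the statement is the Claim_ definition above) =====
theorem group_char_selector_py_spec : Claim_equal_group_char_selector_py := by
  intro chars _
  unfold Spec_group_char_selector_py group_char_selector_py group_char_selector_py_alt
  rw [groupLoopA_eq_foldl chars.toList (chars.toList.length) 0 PySem.Set.empty (by omega),
    List.drop_zero, PySem.Set.ofList_eq_foldl]
  rfl
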